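-- pv_equiv track=rewrite | github.com/Cogito-AI/Cogito | model/model.py | put_in_board
-- ===== SOURCE A (Python) =====
-- from copy import deepcopy
--
-- def put_in_board(word, squares, board, ui):
--     points = [5,5,5]
--     newboard = deepcopy(board)
--     point = 0
--     for i,square in enumerate(squares):
--         if board[square[0]][square[1]] is word['word'][i]:
--             newboard[square[0]][square[1]] = word['word'][i]
--             point += points[ui]
--         elif board[square[0]][square[1]] is '':
--             newboard[square[0]][square[1]] = word['word'][i]
--             point += 0
--         else:
--             return False , board, -1
--     return True, newboard, point
-- ===== SOURCE B (Python) =====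
-- from copy import deepcopy
--
-- def put_in_board(word, squares, board, ui):
--     # Pass 1: validate every square against the ORIGINAL board (same identity
--     # checks as before) and accumulate the score; fail fast without copying.
--     point = 0
--     for i, square in enumerate(squares):
--         cell = board[square[0]][square[1]]
--         if cell is word['word'][i]:
--             point += [5, 5, 5][ui]
--         elif cell is not '':
--             return False, board, -1
--     # Pass 2: only a valid placement pays for the deepcopy and the writes.
--     newboard = deepcopy(board)
--     for i, square in enumerate(squares):
--         newboard[square[0]][square[1]] = word['word'][i]
--     return True, newboard, point
-- ===== Notes on version B (the rewrite author's own statement) =====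
-- stated objective: alternative
-- what changed: A interleaves validation with board construction on an upfront deepcopy; B first runs a pure validate-and-score pass over the original board (failing fast with no copy), and only on success deepcopies the board and runs a separate write pass.
import Mathlib
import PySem

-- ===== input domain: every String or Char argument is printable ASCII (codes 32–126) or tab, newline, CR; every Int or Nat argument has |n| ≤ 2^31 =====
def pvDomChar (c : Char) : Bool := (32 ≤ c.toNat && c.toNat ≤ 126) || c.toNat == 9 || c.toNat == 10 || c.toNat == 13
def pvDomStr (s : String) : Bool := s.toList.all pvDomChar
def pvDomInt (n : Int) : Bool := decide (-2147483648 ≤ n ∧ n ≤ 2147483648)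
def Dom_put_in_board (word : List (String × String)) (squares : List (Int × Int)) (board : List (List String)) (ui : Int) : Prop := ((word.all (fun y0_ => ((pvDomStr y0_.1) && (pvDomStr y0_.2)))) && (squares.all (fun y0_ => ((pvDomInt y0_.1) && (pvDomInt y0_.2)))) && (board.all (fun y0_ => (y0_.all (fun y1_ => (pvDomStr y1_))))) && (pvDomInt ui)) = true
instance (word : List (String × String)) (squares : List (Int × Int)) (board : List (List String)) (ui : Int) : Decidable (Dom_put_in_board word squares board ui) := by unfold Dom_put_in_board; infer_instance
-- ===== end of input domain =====

-- B separates a pure validate-and-score pass from the board-writing pass (deepcopy deferred to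
-- success); A interleaves both on an upfront copy. Equivalence of RETURN VALUES; neither Python
-- mutates its arguments. Python's `is` comparisons are ported as string equality: both compared
-- strings travel through the tester's JSON transport, under which equal 1-char ASCII strings
-- (and the empty string) are CPython's cached singletons, so identity coincides with equality.

-- ===== PORT A =====
-- newboard[a][b] = v  (both Pythons perform exactly this write)
def pvWrite (nb : List (List String)) (sq : Int × Int) (v : String) : List (List String) :=
  PySem.List.pySetD nb sq.1 (PySem.List.pySetD (PySem.List.pyGetD nb sq.1 []) sq.2 v)

-- A's single loop: state = (index i, newboard, point)
def putGoA (wc : List Char) (board : List (List String)) (ui : Int) :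
    List (Int × Int) → Nat → List (List String) → Int → Bool × List (List String) × Int
  | [], _, nb, pt => (true, nb, pt)
  | sq :: rest, i, nb, pt =>
    let cell := PySem.List.pyGetD (PySem.List.pyGetD board sq.1 []) sq.2 ""
    if cell.toList = [wc.getD i ' '] then
      putGoA wc board ui rest (i+1) (pvWrite nb sq (String.ofList [wc.getD i ' ']))
        (pt + PySem.List.pyGetD [5, 5, 5] ui 0)
    else if cell.toList = [] then
      putGoA wc board ui rest (i+1) (pvWrite nb sq (String.ofList [wc.getD i ' '])) pt
    else (false, board, -1)

def put_in_board (word : List (String × String)) (squares : List (Int × Int)) (board : List (List String)) (ui : Int) : Bool × List (List String) × Int :=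
  let wc := ((PySem.Dict.mk word).getD "word" "").toList
  putGoA wc board ui squares 0 board 0

-- ===== PORT B =====
-- pass 1: validate each square and accumulate the score; none = early failure
def pvValidate (wc : List Char) (board : List (List String)) (ui : Int) :
    List (Int × Int) → Nat → Int → Option Int
  | [], _, pt => some pt
  | sq :: rest, i, pt =>
    let cell := PySem.List.pyGetD (PySem.List.pyGetD board sq.1 []) sq.2 ""
    if cell.toList = [wc.getD i ' '] then
      pvValidate wc board ui rest (i+1) (pt + PySem.List.pyGetD [5, 5, 5] ui 0)
    else if cell.toList ≠ [] then none
    else pvValidate wc board ui rest (i+1) pt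

-- pass 2: write the word into the (copied) board
def pvWriteAll (wc : List Char) : List (Int × Int) → Nat → List (List String) → List (List String)
  | [], _, nb => nb
  | sq :: rest, i, nb => pvWriteAll wc rest (i+1) (pvWrite nb sq (String.ofList [wc.getD i ' ']))

def put_in_board_alt (word : List (String × String)) (squares : List (Int × Int)) (board : List (List String)) (ui : Int) : Bool × List (List String) × Int :=
  let wc := ((PySem.Dict.mk word).getD "word" "").toList
  match pvValidate wc board ui squares 0 0 with
  | none => (false, board, -1)
  | some pt => (true, pvWriteAll wc squares 0 board, pt)

-- ===== PRECONDITION & SPEC =====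
-- square sq of the board is addressable (Python negative indices wrap)
def pvValidSq (board : List (List String)) (sq : Int × Int) : Prop :=
  PySem.Raise.InRange board.length sq.1 ∧
  PySem.Raise.InRange (PySem.List.pyGetD board sq.1 []).length sq.2

def pvCell (board : List (List String)) (sq : Int × Int) : String :=
  PySem.List.pyGetD (PySem.List.pyGetD board sq.1 []) sq.2 ""

-- step i of the loop executes without raising and continues (cell matches — scoring, so ui must
-- be a valid index into [5,5,5] — or cell is empty)
def pvGood (word : List (String × String)) (squares : List (Int × Int)) (board : List (List String)) (ui : Int) (i : Nat) : Prop :=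
  pvValidSq board (squares.getD i (0, 0)) ∧
  (PySem.Dict.mk word).get? "word" ≠ none ∧
  i < ((PySem.Dict.mk word).getD "word" "").toList.length ∧
  ((pvCell board (squares.getD i (0, 0))).toList =
      [((PySem.Dict.mk word).getD "word" "").toList.getD i ' '] ∨
    (pvCell board (squares.getD i (0, 0))).toList = []) ∧
  ((pvCell board (squares.getD i (0, 0))).toList =
      [((PySem.Dict.mk word).getD "word" "").toList.getD i ' '] → PySem.Raise.InRange 3 ui)

-- step k executes without raising and takes the early (False, board, -1) return
def pvBad (word : List (String × String)) (squares : List (Int × Int)) (board : List (List String)) (k : Nat) : Prop :=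
  pvValidSq board (squares.getD k (0, 0)) ∧
  (PySem.Dict.mk word).get? "word" ≠ none ∧
  k < ((PySem.Dict.mk word).getD "word" "").toList.length ∧
  (pvCell board (squares.getD k (0, 0))).toList ≠
    [((PySem.Dict.mk word).getD "word" "").toList.getD k ' '] ∧
  (pvCell board (squares.getD k (0, 0))).toList ≠ []

-- Pre_ holds exactly when Python A returns normally: either every loop step runs and continues
-- (missing 'word' key, an out-of-range square/letter index or, on a scoring step, ui outside
-- [-3,3) would raise), or some good prefix is followed by a step taking the early False return.
def Pre_put_in_board (word : List (String × String)) (squares : List (Int × Int)) (board : List (List String)) (ui : Int) : Prop :=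
  (∀ i ∈ List.range squares.length, pvGood word squares board ui i) ∨
  (∃ k ∈ List.range squares.length,
    (∀ j ∈ List.range k, pvGood word squares board ui j) ∧ pvBad word squares board k)
instance (word : List (String × String)) (squares : List (Int × Int)) (board : List (List String)) (ui : Int) : Decidable (Pre_put_in_board word squares board ui) := by unfold Pre_put_in_board pvGood pvBad pvValidSq; infer_instance

def pvWitness_put_in_board : (List (String × String)) × (List (Int × Int)) × List (List String) × Int :=
  ([("word", "a")], [(0, 0)], [[""]], 0)

def Spec_put_in_board (word : List (String × String)) (squares : List (Int × Int)) (board : List (List String)) (ui : Int) (out : Bool × List (List String) × Int) : Prop := out = put_in_board_alt word squares board ui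
instance (word : List (String × String)) (squares : List (Int × Int)) (board : List (List String)) (ui : Int) (out : Bool × List (List String) × Int) : Decidable (Spec_put_in_board word squares board ui out) := by unfold Spec_put_in_board; infer_instance

-- ===== CLAIM (what is proved, stated in full; the proofs are below) =====
def Claim_equal_put_in_board : Prop := ∀ (word : List (String × String)) (squares : List (Int × Int)) (board : List (List String)) (ui : Int), Dom_put_in_board word squares board ui → Pre_put_in_board word squares board ui → Spec_put_in_board word squares board ui (put_in_board word squares board ui)

-- ===== LEMMAS AND PROOFS =====

-- A's interleaved loop equals B's validate pass followed (on success) by B's write pass.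
theorem putGoA_eq_alt (wc : List Char) (board : List (List String)) (ui : Int) :
    ∀ (rest : List (Int × Int)) (i : Nat) (nb : List (List String)) (pt : Int),
      putGoA wc board ui rest i nb pt =
        match pvValidate wc board ui rest i pt with
        | none => (false, board, -1)
        | some p => (true, pvWriteAll wc rest i nb, p) := by
  intro rest
  induction rest with
  | nil => intro i nb pt; simp [putGoA, pvValidate, pvWriteAll]
  | cons sq rest ih =>
    intro i nb pt
    simp only [putGoA, pvValidate, ne_eq, ite_not]
    split_ifs with h1 h2
    · rw [ih]
      cases pvValidate wc board ui rest (i + 1) (pt + PySem.List.pyGetD [5, 5, 5] ui 0) <;>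
        simp [pvWriteAll]
    · rw [ih]
      cases pvValidate wc board ui rest (i + 1) pt <;> simp [pvWriteAll]
    · simp

-- ===== VERDICT (by name: the statement is the Claim_ definition above) =====
theorem put_in_board_spec : Claim_equal_put_in_board := by
  intro word squares board ui _hdom _hpre
  unfold Spec_put_in_board put_in_board put_in_board_alt
  exact putGoA_eq_alt _ _ _ squares 0 board 0
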